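-- pv_equiv track=rewrite | github.com/GBLX1/GXScripter-and-.gxscript | autocomplete.py | _dedupe
-- ===== SOURCE A (Python) =====
-- def _dedupe(items):
--     seen = set()
--     out = []
--     for name, desc in items:
--         key = name.lower()
--         if key in seen:
--             continue
--         seen.add(key)
--         out.append((name, desc))
--     out.sort(key=lambda x: x[0].lower())
--     return out
-- ===== SOURCE B (Python) =====
-- def _dedupe(items):
--     out = []
--     prev = None
--     for name, desc in sorted(items, key=lambda x: x[0].lower()):
--         k = name.lower()
--         if prev is not None and k == prev:
--             continue
--         prev = k
--         out.append((name, desc))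
--     return out
-- ===== Notes on version B (the rewrite author's own statement) =====
-- stated objective: alternative
-- what changed: Inverts the phase order: instead of filtering first occurrences with a seen-set and then sorting, B sorts the whole input by lowercased name first (stable) and dedupes adjacent equal-key runs in one pass by comparing to the previous kept key.
import Mathlib
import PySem

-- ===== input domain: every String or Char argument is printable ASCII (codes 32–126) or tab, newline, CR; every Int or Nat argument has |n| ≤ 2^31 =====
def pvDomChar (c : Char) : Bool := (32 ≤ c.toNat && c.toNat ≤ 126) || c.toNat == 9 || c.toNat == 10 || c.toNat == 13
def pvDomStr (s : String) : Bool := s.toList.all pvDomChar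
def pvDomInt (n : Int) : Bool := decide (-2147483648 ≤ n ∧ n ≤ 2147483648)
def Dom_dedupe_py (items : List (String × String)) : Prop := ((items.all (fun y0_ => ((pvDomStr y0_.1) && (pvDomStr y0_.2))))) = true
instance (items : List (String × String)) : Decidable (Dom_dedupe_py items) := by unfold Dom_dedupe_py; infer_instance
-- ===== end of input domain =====

-- B inverts A's phase order: sort the whole input by lowercased name first (stable), then
-- dedupe adjacent equal-key runs in one pass; same cost, different decomposition.

-- ===== PORT A =====
-- seen-set filter of first occurrences, then sort by lowercased name
def dedupe_py (items : List (String × String)) : List (String × String) :=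
  let st := items.foldl
    (fun (st : PySem.Set String × List (String × String)) p =>
      let key := PySem.Str.lower p.1
      if PySem.Set.contains st.1 key then st
      else (PySem.Set.add st.1 key, st.2 ++ [p]))
    (PySem.Set.empty, [])
  PySem.List.sorted st.2 (fun x => PySem.Str.lower x.1) false

-- ===== PORT B =====
-- sort by lowercased name, then keep an element only when its key differs from the previous kept key
def dedupe_py_alt (items : List (String × String)) : List (String × String) :=
  let st := (PySem.List.sorted items (fun x => PySem.Str.lower x.1) false).foldl
    (fun (st : List (String × String) × Option String) p =>
      let k := PySem.Str.lower p.1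
      match st.2 with
      | some prev => if k == prev then st else (st.1 ++ [p], some k)
      | none => (st.1 ++ [p], some k))
    ([], none)
  st.1

-- ===== PRECONDITION & SPEC =====
def Spec_dedupe_py (items : List (String × String)) (out : List (String × String)) : Prop := out = dedupe_py_alt items
instance (items : List (String × String)) (out : List (String × String)) : Decidable (Spec_dedupe_py items out) := by unfold Spec_dedupe_py; infer_instance

-- ===== CLAIM (what is proved, stated in full; the proofs are below) =====
def Claim_equal_dedupe_py : Prop := ∀ (items : List (String × String)), Dom_dedupe_py items → Spec_dedupe_py items (dedupe_py items)

-- ===== LEMMAS AND PROOFS =====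

def pvKey (p : String × String) : String := PySem.Str.lower p.1

-- A's filter loop as a structural recursion
def pvFirsts (seen : PySem.Set String) : List (String × String) → List (String × String)
  | [] => []
  | p :: rest =>
      if PySem.Set.contains seen (pvKey p) then pvFirsts seen rest
      else p :: pvFirsts (PySem.Set.add seen (pvKey p)) rest

-- B's adjacent-dedupe loop as a structural recursion
def pvAdj (prev : Option String) : List (String × String) → List (String × String)
  | [] => []
  | p :: rest =>
      match prev with
      | some pk => if pvKey p == pk then pvAdj prev rest else p :: pvAdj (some (pvKey p)) rest
      | none => p :: pvAdj (some (pvKey p)) rest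

theorem pvFoldlA (l : List (String × String)) : ∀ (seen : PySem.Set String) (out : List (String × String)),
    (l.foldl (fun (st : PySem.Set String × List (String × String)) p =>
      let key := PySem.Str.lower p.1
      if PySem.Set.contains st.1 key then st
      else (PySem.Set.add st.1 key, st.2 ++ [p])) (seen, out)).2 = out ++ pvFirsts seen l := by
  induction l with
  | nil => intro seen out; simp [pvFirsts]
  | cons p rest ih =>
      intro seen out
      simp only [List.foldl_cons, pvFirsts, pvKey]
      by_cases h : PySem.Set.contains seen (PySem.Str.lower p.1)
      · rw [if_pos h, if_pos h, ih]
      · rw [if_neg h, if_neg h, ih, List.append_assoc]; rfl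

theorem pvFoldlB (l : List (String × String)) : ∀ (prev : Option String) (acc : List (String × String)),
    (l.foldl (fun (st : List (String × String) × Option String) p =>
      let k := PySem.Str.lower p.1
      match st.2 with
      | some pk => if k == pk then st else (st.1 ++ [p], some k)
      | none => (st.1 ++ [p], some k)) (acc, prev)).1 = acc ++ pvAdj prev l := by
  induction l with
  | nil => intro prev acc; simp [pvAdj]
  | cons p rest ih =>
      intro prev acc
      cases prev with
      | none =>
          simp only [List.foldl_cons, pvAdj, pvKey]
          rw [ih, List.append_assoc]; rfl
      | some pk =>
          simp only [List.foldl_cons, pvAdj, pvKey]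
          by_cases h : (PySem.Str.lower p.1 == pk) = true
          · rw [if_pos h, if_pos h, ih]
          · rw [if_neg h, if_neg h, ih, List.append_assoc]; rfl

theorem dedupe_py_eq (items : List (String × String)) :
    dedupe_py items = PySem.List.sorted (pvFirsts PySem.Set.empty items) pvKey false := by
  unfold dedupe_py
  dsimp only
  rw [pvFoldlA, List.nil_append]
  rfl

theorem dedupe_py_alt_eq (items : List (String × String)) :
    dedupe_py_alt items = pvAdj none (PySem.List.sorted items pvKey false) := by
  unfold dedupe_py_alt
  dsimp only
  rw [pvFoldlB, List.nil_append]
  rfl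

-- membership characterisation of A's first-occurrence filter
theorem pvMemFirsts (l : List (String × String)) : ∀ (seen : PySem.Set String) (p : String × String),
    p ∈ pvFirsts seen l ↔ pvKey p ∉ seen ∧ l.find? (fun q => pvKey q == pvKey p) = some p := by
  induction l with
  | nil => intro seen p; simp [pvFirsts]
  | cons q rest ih =>
      intro seen p
      simp only [pvFirsts]
      by_cases h : pvKey q ∈ seen
      · rw [if_pos ((PySem.Set.contains_iff _ _).mpr h)]
        by_cases hk : pvKey q = pvKey p
        · rw [List.find?_cons_of_pos (p := fun q => pvKey q == pvKey p) (beq_iff_eq.mpr hk)]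
          simp only [ih]
          constructor
          · rintro ⟨hn, _⟩; exact absurd (hk ▸ h) hn
          · rintro ⟨hn, _⟩; exact absurd (hk ▸ h) hn
        · rw [List.find?_cons_of_neg (p := fun q => pvKey q == pvKey p) (by simp [hk])]
          exact ih seen p
      · rw [if_neg (fun hc => h ((PySem.Set.contains_iff _ _).mp hc))]
        by_cases hk : pvKey q = pvKey p
        · rw [List.find?_cons_of_pos (p := fun q => pvKey q == pvKey p) (beq_iff_eq.mpr hk)]
          simp only [List.mem_cons, ih]
          constructor
          · rintro (rfl | ⟨hn, _⟩)
            · exact ⟨fun hm => h (hk ▸ hm), rfl⟩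
            · exact absurd ((PySem.Set.mem_add _ _ _).mpr (Or.inr hk.symm)) hn
          · rintro ⟨_, hf⟩
            exact Or.inl (Option.some_inj.mp hf).symm
        · rw [List.find?_cons_of_neg (p := fun q => pvKey q == pvKey p) (by simp [hk])]
          simp only [List.mem_cons, ih]
          constructor
          · rintro (rfl | ⟨hn, hf⟩)
            · exact absurd rfl hk
            · exact ⟨fun hm => hn ((PySem.Set.mem_add _ _ _).mpr (Or.inl hm)), hf⟩
          · rintro ⟨hn, hf⟩
            refine Or.inr ⟨fun hm => ?_, hf⟩
            rcases (PySem.Set.mem_add _ _ _).mp hm with hm' | he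
            · exact hn hm'
            · exact hk he.symm

theorem pvFirstsNodupKeys (l : List (String × String)) : ∀ (seen : PySem.Set String),
    ((pvFirsts seen l).map pvKey).Nodup := by
  induction l with
  | nil => intro seen; simp [pvFirsts]
  | cons q rest ih =>
      intro seen
      simp only [pvFirsts]
      by_cases h : pvKey q ∈ seen
      · rw [if_pos ((PySem.Set.contains_iff _ _).mpr h)]; exact ih seen
      · rw [if_neg (fun hc => h ((PySem.Set.contains_iff _ _).mp hc))]
        simp only [List.map_cons, List.nodup_cons]
        refine ⟨?_, ih _⟩
        intro hmem
        obtain ⟨r, hr, hkey⟩ := List.mem_map.mp hmem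
        have h2 := ((pvMemFirsts rest _ r).mp hr).1
        exact h2 ((PySem.Set.mem_add _ _ _).mpr (Or.inr hkey))

-- membership characterisation of B's adjacent dedupe on a key-sorted list
theorem pvMemAdjSome (l : List (String × String)) : ∀ (pk : String) (p : String × String),
    l.Pairwise (fun a b => pvKey a ≤ pvKey b) → (∀ q ∈ l, pk ≤ pvKey q) →
    (p ∈ pvAdj (some pk) l ↔ pvKey p ≠ pk ∧ l.find? (fun q => pvKey q == pvKey p) = some p) := by
  induction l with
  | nil => intro pk p _ _; simp [pvAdj]
  | cons q rest ih =>
      intro pk p hs hb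
      have hq : pk ≤ pvKey q := hb q (by simp)
      have hrest : rest.Pairwise (fun a b => pvKey a ≤ pvKey b) := hs.of_cons
      have hqall : ∀ r ∈ rest, pvKey q ≤ pvKey r := fun r hr => List.rel_of_pairwise_cons hs hr
      simp only [pvAdj]
      by_cases he : (pvKey q == pk) = true
      · rw [if_pos he]
        have heq : pvKey q = pk := beq_iff_eq.mp he
        rw [ih pk p hrest (fun r hr => heq ▸ hqall r hr)]
        by_cases hk : (pvKey q == pvKey p) = true
        · have heqp : pvKey q = pvKey p := beq_iff_eq.mp hk
          rw [List.find?_cons_of_pos (p := fun q => pvKey q == pvKey p) hk]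
          constructor
          · rintro ⟨hne, _⟩
            exact absurd (heqp ▸ heq) hne
          · rintro ⟨hne, _⟩
            exact absurd (heqp ▸ heq) hne
        · rw [List.find?_cons_of_neg (p := fun q => pvKey q == pvKey p) hk]
      · rw [if_neg he]
        have hlt : pk < pvKey q := lt_of_le_of_ne hq (fun e => he (beq_iff_eq.mpr e.symm))
        simp only [List.mem_cons, ih (pvKey q) p hrest hqall]
        by_cases hk : (pvKey q == pvKey p) = true
        · have heqp : pvKey q = pvKey p := beq_iff_eq.mp hk
          rw [List.find?_cons_of_pos (p := fun q => pvKey q == pvKey p) hk]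
          constructor
          · rintro (rfl | ⟨hne, hf⟩)
            · exact ⟨ne_of_gt hlt, rfl⟩
            · exact absurd heqp.symm hne
          · rintro ⟨_, hf⟩
            exact Or.inl (Option.some_inj.mp hf).symm
        · rw [List.find?_cons_of_neg (p := fun q => pvKey q == pvKey p) hk]
          constructor
          · rintro (rfl | ⟨hne, hf⟩)
            · exact absurd (beq_self_eq_true (pvKey p)) hk
            · have hp : p ∈ rest := List.mem_of_find?_eq_some hf
              exact ⟨ne_of_gt (lt_of_lt_of_le hlt (hqall p hp)), hf⟩
          · rintro ⟨hne, hf⟩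
            exact Or.inr ⟨fun e => hk (beq_iff_eq.mpr e.symm), hf⟩

theorem pvMemAdjNone (l : List (String × String)) (p : String × String)
    (hs : l.Pairwise (fun a b => pvKey a ≤ pvKey b)) :
    p ∈ pvAdj none l ↔ l.find? (fun q => pvKey q == pvKey p) = some p := by
  cases l with
  | nil => simp [pvAdj]
  | cons q rest =>
      have hrest : rest.Pairwise (fun a b => pvKey a ≤ pvKey b) := hs.of_cons
      have hqall : ∀ r ∈ rest, pvKey q ≤ pvKey r := fun r hr => List.rel_of_pairwise_cons hs hr
      simp only [pvAdj, List.mem_cons,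
        pvMemAdjSome rest (pvKey q) p hrest hqall]
      by_cases hk : (pvKey q == pvKey p) = true
      · have heqp : pvKey q = pvKey p := beq_iff_eq.mp hk
        rw [List.find?_cons_of_pos (p := fun q => pvKey q == pvKey p) hk]
        constructor
        · rintro (rfl | ⟨hne, _⟩)
          · rfl
          · exact absurd heqp.symm hne
        · intro hf
          exact Or.inl (Option.some_inj.mp hf).symm
      · rw [List.find?_cons_of_neg (p := fun q => pvKey q == pvKey p) hk]
        constructor
        · rintro (rfl | ⟨_, hf⟩)
          · exact absurd (beq_self_eq_true (pvKey p)) hk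
          · exact hf
        · intro hf
          exact Or.inr ⟨fun e => hk (beq_iff_eq.mpr e.symm), hf⟩

theorem pvAdjPairwiseSome (l : List (String × String)) : ∀ (pk : String),
    l.Pairwise (fun a b => pvKey a ≤ pvKey b) → (∀ q ∈ l, pk ≤ pvKey q) →
    (pvAdj (some pk) l).Pairwise (fun a b => pvKey a < pvKey b) ∧
      ∀ r ∈ pvAdj (some pk) l, pk < pvKey r := by
  induction l with
  | nil => intro pk _ _; simp [pvAdj]
  | cons q rest ih =>
      intro pk hs hb
      have hq : pk ≤ pvKey q := hb q (by simp)
      have hrest : rest.Pairwise (fun a b => pvKey a ≤ pvKey b) := hs.of_cons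
      have hqall : ∀ r ∈ rest, pvKey q ≤ pvKey r := fun r hr => List.rel_of_pairwise_cons hs hr
      simp only [pvAdj]
      by_cases he : (pvKey q == pk) = true
      · rw [if_pos he]
        have heq : pvKey q = pk := beq_iff_eq.mp he
        exact ih pk hrest (fun r hr => heq ▸ hqall r hr)
      · rw [if_neg he]
        have hlt : pk < pvKey q := lt_of_le_of_ne hq (fun e => he (beq_iff_eq.mpr e.symm))
        obtain ⟨hpw, hgt⟩ := ih (pvKey q) hrest hqall
        refine ⟨List.Pairwise.cons (fun r hr => hgt r hr) hpw, ?_⟩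
        intro r hr
        rcases List.mem_cons.mp hr with rfl | hr'
        · exact hlt
        · exact lt_trans hlt (hgt r hr')

theorem pvAdjPairwiseNone (l : List (String × String))
    (hs : l.Pairwise (fun a b => pvKey a ≤ pvKey b)) :
    (pvAdj none l).Pairwise (fun a b => pvKey a < pvKey b) := by
  cases l with
  | nil => simp [pvAdj]
  | cons q rest =>
      have hrest : rest.Pairwise (fun a b => pvKey a ≤ pvKey b) := hs.of_cons
      have hqall : ∀ r ∈ rest, pvKey q ≤ pvKey r := fun r hr => List.rel_of_pairwise_cons hs hr
      obtain ⟨hpw, hgt⟩ := pvAdjPairwiseSome rest (pvKey q) hrest hqall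
      exact List.Pairwise.cons (fun r hr => hgt r hr) hpw

-- first occurrence of each key survives one sorted insertion
theorem pvInsFind (ys : List (String × String)) : ∀ (x : String × String) (k : String),
    ys.Pairwise (fun a b => pvKey a ≤ pvKey b) →
    (PySem.List.insertBy (fun a b => decide (pvKey a < pvKey b)) x ys).find? (fun q => pvKey q == k)
      = (ys.find? (fun q => pvKey q == k)).or (if pvKey x == k then some x else none) := by
  induction ys with
  | nil => intro x k _; simp [PySem.List.insertBy]
  | cons y t ih =>
      intro x k hs
      have ht : t.Pairwise (fun a b => pvKey a ≤ pvKey b) := hs.of_cons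
      have hall : ∀ r ∈ t, pvKey y ≤ pvKey r := fun r hr => List.rel_of_pairwise_cons hs hr
      simp only [PySem.List.insertBy]
      by_cases hlt : (pvKey x < pvKey y)
      · rw [if_pos (by simpa using hlt)]
        by_cases hxk : (pvKey x == k) = true
        · have hxkeq : pvKey x = k := beq_iff_eq.mp hxk
          have hnone : (y :: t).find? (fun q => pvKey q == k) = none := by
            rw [List.find?_eq_none]
            intro r hr
            have hgt : pvKey x < pvKey r := by
              rcases List.mem_cons.mp hr with rfl | hr'
              · exact hlt
              · exact lt_of_lt_of_le hlt (hall r hr')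
            simp [← hxkeq, ne_of_gt hgt]
          rw [List.find?_cons_of_pos (p := fun q => pvKey q == k) hxk, hnone, if_pos hxk]
          rfl
        · rw [List.find?_cons_of_neg (p := fun q => pvKey q == k) hxk, if_neg hxk]
          cases (y :: t).find? (fun q => pvKey q == k) <;> rfl
      · rw [if_neg (by simpa using hlt)]
        by_cases hyk : (pvKey y == k) = true
        · rw [List.find?_cons_of_pos (p := fun q => pvKey q == k) hyk,
            List.find?_cons_of_pos (p := fun q => pvKey q == k) hyk]; rfl
        · rw [List.find?_cons_of_neg (p := fun q => pvKey q == k) hyk,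
            List.find?_cons_of_neg (p := fun q => pvKey q == k) hyk]; exact ih x k ht

-- stability of PySem's sort: the first element with a given key is unchanged
theorem pvSortStable (l : List (String × String)) (k : String) :
    (PySem.List.sorted l pvKey false).find? (fun q => pvKey q == k) = l.find? (fun q => pvKey q == k) := by
  induction l using List.reverseRecOn with
  | nil => simp
  | append_singleton l x ih =>
      have h1 : PySem.List.sorted (l ++ [x]) pvKey false
          = PySem.List.insertBy (fun a b => decide (pvKey a < pvKey b)) x (PySem.List.sorted l pvKey false) := by
        rw [PySem.List.sorted_eq_foldl_insertBy, List.foldl_append, ← PySem.List.sorted_eq_foldl_insertBy]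
        rfl
      rw [h1, pvInsFind _ x k (PySem.List.sorted_pairwise l pvKey), ih, List.find?_append]
      cases l.find? (fun q => pvKey q == k) <;>
        by_cases h : (pvKey x == k) = true <;> simp [h, List.find?]

-- ===== VERDICT (by name: the statement is the Claim_ definition above) =====
theorem dedupe_py_spec : Claim_equal_dedupe_py := by
  intro items _
  unfold Spec_dedupe_py
  rw [dedupe_py_eq, dedupe_py_alt_eq]
  have hs : (PySem.List.sorted items pvKey false).Pairwise (fun a b => pvKey a ≤ pvKey b) :=
    PySem.List.sorted_pairwise items pvKey
  have hpair : (pvAdj none (PySem.List.sorted items pvKey false)).Pairwise (fun a b => pvKey a < pvKey b) :=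
    pvAdjPairwiseNone _ hs
  have ndB : (pvAdj none (PySem.List.sorted items pvKey false)).Nodup :=
    hpair.imp (fun h => fun e => absurd (e ▸ h) (lt_irrefl _))
  have ndF : (pvFirsts PySem.Set.empty items).Nodup :=
    (pvFirstsNodupKeys items PySem.Set.empty).of_map
  have hperm : (pvAdj none (PySem.List.sorted items pvKey false)).Perm (pvFirsts PySem.Set.empty items) := by
    rw [List.perm_ext_iff_of_nodup ndB ndF]
    intro p
    rw [pvMemAdjNone _ p hs, pvSortStable, pvMemFirsts items PySem.Set.empty p]
    simp [PySem.Set.empty]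
  apply PySem.List.sorted_eq_of_perm_of_pairwise_lt
  · exact hperm
  · exact hpair
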